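-- pv_equiv track=rewrite | github.com/C2-Q/C2Q | src/c2q-dataset/code_validation/algorithmic_structural_level_validation.py | bucket_int
-- ===== SOURCE A (Python) =====
-- def bucket_int(v: int, edges):
--     """
--     Bucket integer v into ranges.
--     edges is a sorted list of upper bounds, e.g. [3,5,7,10,20]
--     returns a label like "<= 3", "4-5", "6-7", ...
--     """
--     if not edges:
--         return str(v)
--     prev = None
--     for ub in edges:
--         if v <= ub:
--             if prev is None:
--                 return f"<= {ub}"
--             return f"{prev + 1}-{ub}"
--         prev = ub
--     return f"> {edges[-1]}"
-- ===== SOURCE B (Python) =====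
-- def bucket_int(v: int, edges):
--     """Precompute every bucket label from adjacent edge pairs, then select by
--     the first-match index (no prev accumulator, no in-loop returns)."""
--     if not edges:
--         return str(v)
--     labels = [f"<= {edges[0]}"]
--     labels += [f"{a + 1}-{b}" for a, b in zip(edges, edges[1:])]
--     labels.append(f"> {edges[-1]}")
--     k = next((i for i, ub in enumerate(edges) if v <= ub), len(edges))
--     return labels[k]
-- ===== Notes on version B (the rewrite author's own statement) =====
-- stated objective: alternative
-- what changed: Instead of A's single scan that threads a `prev` accumulator and returns from inside the loop, B precomputes the whole label table (head label, zip of adjacent edge pairs, tail label) and selects the entry at the first-match index obtained with enumerate/next.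
import Mathlib
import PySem

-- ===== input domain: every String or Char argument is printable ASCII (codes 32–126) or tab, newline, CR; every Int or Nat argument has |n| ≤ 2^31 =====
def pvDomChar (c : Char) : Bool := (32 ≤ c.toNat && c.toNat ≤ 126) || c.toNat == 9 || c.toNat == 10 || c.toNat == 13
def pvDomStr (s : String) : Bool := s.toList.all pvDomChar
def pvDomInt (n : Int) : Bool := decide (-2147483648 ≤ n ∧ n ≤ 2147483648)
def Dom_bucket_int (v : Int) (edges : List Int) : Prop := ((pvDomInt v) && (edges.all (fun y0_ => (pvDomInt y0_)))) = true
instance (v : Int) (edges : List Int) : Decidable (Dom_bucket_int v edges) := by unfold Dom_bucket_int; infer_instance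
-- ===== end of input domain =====

-- B precomputes the full bucket-label table from adjacent edge pairs and selects by the first-match
-- index, instead of A's single scan threading a `prev` accumulator with in-loop returns (alternative
-- decomposition, same asymptotic cost).


-- ===== PORT A =====
-- A's loop: first edge ub with v ≤ ub wins, formatted with `prev`; falling through gives "> edges[-1]".
def bucketLoopA (v : Int) (edges : List Int) : Option Int → List Int → String
  | _, [] => "> " ++ PySem.Int.toStr (PySem.List.pyGetD edges (-1) 0)
  | prev, ub :: rest =>
    if v ≤ ub then
      match prev with
      | none => "<= " ++ PySem.Int.toStr ub
      | some p => PySem.Int.toStr (p + 1) ++ "-" ++ PySem.Int.toStr ub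
    else bucketLoopA v edges (some ub) rest

def bucket_int (v : Int) (edges : List Int) : String :=
  if edges = [] then PySem.Int.toStr v else bucketLoopA v edges none edges

-- ===== PORT B =====
-- B: labels = ["<= e0"] + ["a+1-b" for a,b in zip(edges, edges[1:])] + ["> e_last"];
--    k = next((i for i, ub in enumerate(edges) if v <= ub), len(edges)); return labels[k]
def bucket_int_alt (v : Int) (edges : List Int) : String :=
  if edges = [] then PySem.Int.toStr v
  else
    let labels : List String :=
      ("<= " ++ PySem.Int.toStr (PySem.List.pyGetD edges 0 0)) ::
      (((edges.zip (PySem.List.slice edges (some 1) none)).map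
          (fun p => PySem.Int.toStr (p.1 + 1) ++ "-" ++ PySem.Int.toStr p.2)) ++
       ["> " ++ PySem.Int.toStr (PySem.List.pyGetD edges (-1) 0)])
    let k : Int :=
      (((PySem.List.enumerate edges 0).find? (fun p => decide (v ≤ p.2))).map Prod.fst).getD
        (edges.length : Int)
    PySem.List.pyGetD labels k ""

-- ===== PRECONDITION & SPEC =====
def Spec_bucket_int (v : Int) (edges : List Int) (out : String) : Prop := out = bucket_int_alt v edges
instance (v : Int) (edges : List Int) (out : String) : Decidable (Spec_bucket_int v edges out) := by unfold Spec_bucket_int; infer_instance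

-- ===== CLAIM (what is proved, stated in full; the proofs are below) =====
def Claim_equal_bucket_int : Prop := ∀ (v : Int) (edges : List Int), Dom_bucket_int v edges → Spec_bucket_int v edges (bucket_int v edges)

-- ===== LEMMAS AND PROOFS =====

-- the label both programs emit, as a function of the first-match index k (first k with v ≤ edges[k], or length)
def labelOf (v : Int) (edges : List Int) (k : Nat) : String :=
  if k = edges.length then "> " ++ PySem.Int.toStr (PySem.List.pyGetD edges (-1) 0)
  else if k = 0 then "<= " ++ PySem.Int.toStr (PySem.List.pyGetD edges 0 0)
  else PySem.Int.toStr (PySem.List.pyGetD edges ((k : Int) - 1) 0 + 1) ++ "-" ++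
       PySem.Int.toStr (PySem.List.pyGetD edges (k : Int) 0)

-- enumerate/find?/next(..., default) computes the first-match index (findIdx), offset by the start
lemma enumFind (v : Int) : ∀ (l : List Int) (s : Nat),
    (((PySem.List.enumerate l (s : Int)).find? (fun p => decide (v ≤ p.2))).map Prod.fst).getD
        ((s : Int) + l.length) =
      (s : Int) + l.findIdx (fun e => decide (v ≤ e)) := by
  intro l
  induction l with
  | nil => intro s; simp [PySem.List.enumerate_nil]
  | cons x l ih =>
    intro s
    rw [PySem.List.enumerate_cons, List.find?_cons]
    by_cases hx : v ≤ x
    · simp [hx, List.findIdx_cons]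
    · have hcast : ((s : Int) + 1) = ((s + 1 : Nat) : Int) := by push_cast; ring
      have hdef : ((s : Int) + ((x :: l).length : Int)) = (((s + 1 : Nat) : Int) + l.length) := by
        simp only [List.length_cons]; push_cast; ring
      simp only [hx, decide_false, hdef, hcast]
      rw [ih (s + 1), List.findIdx_cons]
      simp only [hx, decide_false, cond_false]
      push_cast; ring

lemma loopA_inv (v : Int) (edges : List Int) (k : Nat) (hk : k ≤ edges.length)
    (h1 : ∀ j, j < k → edges.getD j 0 < v)
    (h2 : k < edges.length → v ≤ edges.getD k 0) :
    ∀ (rest : List Int) (i : Nat) (prev : Option Int),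
      rest = edges.drop i → i ≤ k →
      prev = (if i = 0 then none else some (edges.getD (i - 1) 0)) →
      bucketLoopA v edges prev rest = labelOf v edges k := by
  intro rest
  induction rest with
  | nil =>
    intro i prev hdrop hik hprev
    have hlen : edges.length ≤ i := by
      have := congrArg List.length hdrop
      simp [List.length_drop] at this; omega
    have hkn : k = edges.length := by omega
    simp only [bucketLoopA, labelOf, hkn, if_true]
  | cons ub rest' ihr =>
    intro i prev hdrop hik hprev
    have hin : i < edges.length := by
      have := congrArg List.length hdrop
      simp [List.length_drop] at this; omega
    have hub : ub = edges.getD i 0 := by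
      have : edges.getD i 0 = (edges.drop i).getD 0 0 := by
        rw [List.getD_eq_getElem edges 0 hin, List.getD_eq_getElem _ 0 (by simp [List.length_drop]; omega)]
        simp
      rw [this, ← hdrop]; rfl
    simp only [bucketLoopA]
    by_cases hle : v ≤ ub
    · simp only [hle, if_true]
      have hik' : i = k := by
        by_contra hne
        have : i < k := by omega
        exact absurd (hub ▸ h1 i this) (by omega)
      subst hik'
      subst hprev
      by_cases hi0 : i = 0
      · subst hi0
        have hne0 : (0 : Nat) ≠ edges.length := by omega
        simp [labelOf, hne0, hub, PySem.List.pyGetD_zero]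
      · simp only [hi0, if_false, labelOf]
        have hne : i ≠ edges.length := by omega
        simp only [hne, if_false]
        have e1 : PySem.List.pyGetD edges ((i : Int) - 1) 0 = edges.getD (i - 1) 0 := by
          have : ((i : Int) - 1) = ((i - 1 : Nat) : Int) := by omega
          rw [this, PySem.List.pyGetD_natCast]
        have e2 : PySem.List.pyGetD edges (i : Int) 0 = edges.getD i 0 := PySem.List.pyGetD_natCast edges i 0
        rw [e1, e2, hub]
    · simp only [hle, if_false]
      have hiv : edges.getD i 0 < v := by rw [hub] at hle; omega
      have hik' : i < k := by
        rcases Nat.lt_or_ge i k with h | h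
        · exact h
        · have : i = k := by omega
          subst this
          exact absurd (h2 hin) (by omega)
      exact ihr (i + 1) (some ub)
        (by
          have h' : List.drop 1 (ub :: rest') = List.drop 1 (List.drop i edges) := by rw [hdrop]
          simpa [List.drop_drop, Nat.add_comm] using h')
        (by omega) (by simp [hub])

-- B's table lookup at index k is labelOf k
lemma alt_eq_labelOf (v : Int) (edges : List Int) (hne : edges ≠ []) :
    bucket_int_alt v edges = labelOf v edges (edges.findIdx (fun e => decide (v ≤ e))) := by
  rw [bucket_int_alt, if_neg hne]
  set k := edges.findIdx (fun e => decide (v ≤ e)) with hkdef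
  clear_value k
  have hk : k ≤ edges.length := hkdef ▸ List.findIdx_le_length
  have hn : 0 < edges.length := List.length_pos_iff.mpr hne
  have hkint : (((PySem.List.enumerate edges 0).find? (fun p => decide (v ≤ p.2))).map Prod.fst).getD
      (edges.length : Int) = (k : Int) := by
    have := enumFind v edges 0
    simpa [hkdef] using this
  simp only [hkint]
  have hzip : (edges.zip (PySem.List.slice edges (some 1) none)) = edges.zip edges.tail := by
    rw [PySem.List.slice_from_one]
  have hlen_tail : edges.tail.length = edges.length - 1 := List.length_tail
  have hlen_zip : (edges.zip edges.tail).length = edges.length - 1 := by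
    simp [List.length_zip, hlen_tail]
  rw [hzip]
  have hpg : ∀ (ls : List String) (m : Nat), m < ls.length → PySem.List.pyGetD ls (m : Int) "" = ls.getD m "" :=
    fun ls m _ => PySem.List.pyGetD_natCast ls m ""
  set mid := (edges.zip edges.tail).map (fun p => PySem.Int.toStr (p.1 + 1) ++ "-" ++ PySem.Int.toStr p.2) with hmid
  have hlen_mid : mid.length = edges.length - 1 := by simp [hmid, hlen_zip]
  rcases Nat.eq_or_lt_of_le hk with hkn | hklt
  · -- k = length: the "> last" label
    rw [hkn]
    rw [hpg _ _ (by simp [hlen_mid]; omega)]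
    rw [List.getD_eq_getElem _ "" (by simp [hlen_mid]; omega)]
    unfold labelOf
    simp only [ite_true]
    rw [List.getElem_cons]
    simp only [dif_neg (by omega : ¬ edges.length = 0)]
    rw [List.getElem_append_right (by omega)]
    simp [hlen_mid]
  · -- k < length
    rw [hpg _ _ (by simp [hlen_mid]; omega)]
    rw [List.getD_eq_getElem _ "" (by simp [hlen_mid]; omega)]
    unfold labelOf
    simp only [if_neg (by omega : ¬ k = edges.length)]
    by_cases hk0 : k = 0
    · subst hk0
      simp
    · simp only [if_neg hk0]
      rw [List.getElem_cons]
      simp only [dif_neg hk0]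
      rw [List.getElem_append_left (by omega)]
      simp only [hmid, List.getElem_map, List.getElem_zip, List.getElem_tail]
      have e1 : PySem.List.pyGetD edges ((k : Int) - 1) 0 = edges.getD (k - 1) 0 := by
        have : ((k : Int) - 1) = ((k - 1 : Nat) : Int) := by omega
        rw [this, PySem.List.pyGetD_natCast]
      have e2 : PySem.List.pyGetD edges (k : Int) 0 = edges.getD k 0 := PySem.List.pyGetD_natCast edges k 0
      rw [e1, e2, List.getD_eq_getElem edges 0 (by omega), List.getD_eq_getElem edges 0 (by omega)]
      have hidx : k - 1 + 1 = k := by omega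
      simp only [hidx]

-- ===== VERDICT (by name: the statement is the Claim_ definition above) =====
theorem bucket_int_spec : Claim_equal_bucket_int := by
  intro v edges _
  unfold Spec_bucket_int
  by_cases hne : edges = []
  · simp [bucket_int, bucket_int_alt, hne]
  · set k := edges.findIdx (fun e => decide (v ≤ e)) with hkdef
    have hk : k ≤ edges.length := List.findIdx_le_length
    have h1 : ∀ j, j < k → edges.getD j 0 < v := by
      intro j hj
      have hjn : j < edges.length := by
        have := List.findIdx_le_length (p := fun e => decide (v ≤ e)) (xs := edges); omega
      have := List.not_of_lt_findIdx (p := fun e => decide (v ≤ e)) (xs := edges) (hkdef ▸ hj)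
      rw [List.getD_eq_getElem edges 0 hjn]
      simpa using this
    have h2 : k < edges.length → v ≤ edges.getD k 0 := by
      intro hkl
      have := List.findIdx_getElem (p := fun e => decide (v ≤ e)) (xs := edges) (w := hkdef ▸ hkl)
      rw [List.getD_eq_getElem edges 0 hkl]
      simpa [← hkdef] using this
    have hA : bucket_int v edges = labelOf v edges k := by
      rw [bucket_int, if_neg hne]
      exact loopA_inv v edges k hk h1 h2 edges 0 none rfl (by omega) (by simp)
    rw [hA, alt_eq_labelOf v edges hne]
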